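-- pv_equiv track=rewrite | github.com/georgysavva/mc-multiplayer-data | cpu_binning_utils/cpu_pinning.py | calculate_cpu_ranges
-- ===== SOURCE A (Python) =====
-- def calculate_cpu_ranges(
--     total_cpus: int, num_instances: int
-- ) -> list[tuple[int, int]]:
--     """Calculate CPU core ranges for each instance.
--
--     Returns a list of (start_cpu, end_cpu) tuples for each instance.
--     Cores are distributed as evenly as possible.
--     """
--     if num_instances <= 0:
--         return []
--
--     cores_per_instance = total_cpus // num_instances
--     extra_cores = total_cpus % num_instances
--
--     ranges = []
--     current_cpu = 0
--
--     for i in range(num_instances):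
--         # Give one extra core to the first 'extra_cores' instances
--         instance_cores = cores_per_instance + (1 if i < extra_cores else 0)
--         if instance_cores > 0:
--             start_cpu = current_cpu
--             end_cpu = current_cpu + instance_cores - 1
--             ranges.append((start_cpu, end_cpu))
--             current_cpu = end_cpu + 1
--         else:
--             # If we have more instances than cores, some get no cores, so raise an error
--             raise ValueError(f"Not enough cores to distribute to {num_instances} instances")
--
--     return ranges
-- ===== SOURCE B (Python) =====
-- def calculate_cpu_ranges(
--     total_cpus: int, num_instances: int
-- ) -> list[tuple[int, int]]:
--     """Calculate CPU core ranges for each instance (closed form per index)."""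
--     if num_instances <= 0:
--         return []
--     if total_cpus < num_instances:
--         raise ValueError(f"Not enough cores to distribute to {num_instances} instances")
--     q, r = divmod(total_cpus, num_instances)
--     return [
--         (i * q + min(i, r), (i + 1) * q + min(i + 1, r) - 1)
--         for i in range(num_instances)
--     ]
-- ===== Notes on version B (the rewrite author's own statement) =====
-- stated objective: simpler
-- what changed: Replaced the stateful loop carrying a running current_cpu cursor by a stateless list comprehension that computes each instance's (start, end) directly from its index via q = total//n, r = total%n, start = i*q + min(i, r); the raise becomes one upfront total_cpus < num_instances check.
import Mathlib
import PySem

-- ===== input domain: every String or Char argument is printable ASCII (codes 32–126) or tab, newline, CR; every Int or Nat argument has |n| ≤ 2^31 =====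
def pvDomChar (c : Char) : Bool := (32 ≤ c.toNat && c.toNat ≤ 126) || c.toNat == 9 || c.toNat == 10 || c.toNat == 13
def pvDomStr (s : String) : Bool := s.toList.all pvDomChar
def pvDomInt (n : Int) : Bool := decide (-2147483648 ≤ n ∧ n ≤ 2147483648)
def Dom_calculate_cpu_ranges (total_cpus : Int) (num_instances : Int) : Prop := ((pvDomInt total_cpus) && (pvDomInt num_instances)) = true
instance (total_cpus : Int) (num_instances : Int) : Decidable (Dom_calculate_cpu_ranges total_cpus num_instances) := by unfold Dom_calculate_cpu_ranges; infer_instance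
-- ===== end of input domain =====

-- B replaces A's running current_cpu cursor by a stateless per-index closed form (simpler decomposition).

-- ===== PORT A =====
-- A's for-loop over range(num_instances) carrying (ranges, current_cpu); on
-- instance_cores ≤ 0 Python raises ValueError — those inputs are outside
-- Pre_; the port returns the accumulated list there (arbitrary).
def calcA_loop (q r : Int) : List Int → List (Int × Int) → Int → List (Int × Int)
  | [], ranges, _ => ranges
  | i :: rest, ranges, cur =>
    let instance_cores := q + (if i < r then 1 else 0)
    if instance_cores > 0 then
      calcA_loop q r rest (ranges ++ [(cur, cur + instance_cores - 1)]) (cur + instance_cores - 1 + 1)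
    else ranges

def calculate_cpu_ranges (total_cpus : Int) (num_instances : Int) : List (Int × Int) :=
  if num_instances ≤ 0 then []
  else
    let cores_per_instance := PySem.Int.floordiv total_cpus num_instances
    let extra_cores := PySem.Int.mod total_cpus num_instances
    calcA_loop cores_per_instance extra_cores (PySem.List.pyRange 0 num_instances 1) [] 0

-- ===== PORT B =====
-- Source B's comprehension; where Source B raises ValueError (excluded by Pre_) the
-- port returns [] (arbitrary).
def calculate_cpu_ranges_alt (total_cpus : Int) (num_instances : Int) : List (Int × Int) :=
  if num_instances ≤ 0 then []
  else if total_cpus < num_instances then []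
  else
    let q := PySem.Int.floordiv total_cpus num_instances
    let r := PySem.Int.mod total_cpus num_instances
    (PySem.List.pyRange 0 num_instances 1).map
      (fun i => (i * q + min i r, (i + 1) * q + min (i + 1) r - 1))

-- ===== PRECONDITION & SPEC =====
-- Pre_ excludes exactly the inputs on which Python A raises ValueError
-- ("Not enough cores…"): 0 < num_instances and total_cpus < num_instances.
def Pre_calculate_cpu_ranges (total_cpus : Int) (num_instances : Int) : Prop :=
  num_instances ≤ 0 ∨ num_instances ≤ total_cpus
instance (total_cpus : Int) (num_instances : Int) : Decidable (Pre_calculate_cpu_ranges total_cpus num_instances) := by unfold Pre_calculate_cpu_ranges; infer_instance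

def pvWitness_calculate_cpu_ranges : Int × Int := (10, 3)

def Spec_calculate_cpu_ranges (total_cpus : Int) (num_instances : Int) (out : List (Int × Int)) : Prop := out = calculate_cpu_ranges_alt total_cpus num_instances
instance (total_cpus : Int) (num_instances : Int) (out : List (Int × Int)) : Decidable (Spec_calculate_cpu_ranges total_cpus num_instances out) := by unfold Spec_calculate_cpu_ranges; infer_instance

-- ===== CLAIM (what is proved, stated in full; the proofs are below) =====
def Claim_equal_calculate_cpu_ranges : Prop := ∀ (total_cpus : Int) (num_instances : Int), Dom_calculate_cpu_ranges total_cpus num_instances → Pre_calculate_cpu_ranges total_cpus num_instances → Spec_calculate_cpu_ranges total_cpus num_instances (calculate_cpu_ranges total_cpus num_instances)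

-- ===== LEMMAS AND PROOFS =====

-- Loop invariant: starting at index k with cursor k*q + min k r, A's loop
-- appends exactly B's closed-form entries for indices k..n-1.
theorem calcA_loop_eq (q r n : Int) (hq : 1 ≤ q) (_hr : 0 ≤ r) :
    ∀ (m : Nat) (k : Int), 0 ≤ k → (n - k).toNat = m → ∀ (acc : List (Int × Int)),
      calcA_loop q r (PySem.List.pyRange k n 1) acc (k * q + min k r)
        = acc ++ (PySem.List.pyRange k n 1).map
            (fun i => (i * q + min i r, (i + 1) * q + min (i + 1) r - 1)) := by
  intro m
  induction m with
  | zero =>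
    intro k hk hm acc
    rw [PySem.List.pyRange_one_eq_nil (by omega)]
    simp [calcA_loop]
  | succ m ih =>
    intro k hk hm acc
    rw [PySem.List.pyRange_one_cons (by omega)]
    have hcores : q + (if k < r then 1 else 0) > 0 := by split_ifs <;> omega
    have hcur : k * q + min k r + (q + (if k < r then 1 else 0)) - 1 + 1
        = (k + 1) * q + min (k + 1) r := by
      split_ifs with h <;> [skip; skip] <;>
        · have : min k r = (if k ≤ r then k else r) := by omega
          have : min (k+1) r = (if k+1 ≤ r then k+1 else r) := by omega
          split_ifs at * <;> ring_nf <;> omega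
    simp only [calcA_loop, if_pos hcores]
    rw [show k * q + min k r + (q + (if k < r then 1 else 0)) - 1 + 1
          = (k + 1) * q + min (k + 1) r from hcur]
    rw [ih (k + 1) (by omega) (by omega)]
    simp [List.map_cons]
    linarith [hcur]

-- ===== VERDICT (by name: the statement is the Claim_ definition above) =====
theorem calculate_cpu_ranges_spec : Claim_equal_calculate_cpu_ranges := by
  intro t n _ hpre
  unfold Spec_calculate_cpu_ranges calculate_cpu_ranges calculate_cpu_ranges_alt
  by_cases hn : n ≤ 0
  · simp [hn]
  · have hnpos : 0 < n := by omega
    have hle : n ≤ t := by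
      rcases hpre with h | h
      · omega
      · exact h
    rw [if_neg hn, if_neg hn, if_neg (by omega : ¬ t < n)]
    have hfd : PySem.Int.floordiv t n = t / n := PySem.Int.floordiv_eq_ediv_of_pos (by omega)
    have hmd : PySem.Int.mod t n = t % n := PySem.Int.mod_eq_emod_of_pos (by omega)
    have hq : 1 ≤ PySem.Int.floordiv t n := by
      rw [hfd]
      have := Int.ediv_le_ediv (by omega : (0:Int) < n) hle
      simpa [Int.ediv_self (by omega : n ≠ 0)] using this
    have hr : 0 ≤ PySem.Int.mod t n := by
      rw [hmd]; exact Int.emod_nonneg t (by omega)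
    have := calcA_loop_eq (PySem.Int.floordiv t n) (PySem.Int.mod t n) n hq hr
      (n - 0).toNat 0 (by omega) rfl []
    simpa [min_eq_left hr] using this
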